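-- pv_equiv track=rewrite | github.com/Ddady1/PolyBot | services/bot/app.py | strip_parenthesis
-- ===== SOURCE A (Python) =====
-- def strip_parenthesis(phrase):
--     # Cleans object name from un-necessary parenthesis
--     cleaned = ''
--     for char in phrase:
--         if char == ('(') or char == ('['):
--             break
--         else:
--             cleaned += char
--     return cleaned.rstrip(' ')
-- ===== SOURCE B (Python) =====
-- def strip_parenthesis(phrase):
--     # Cleans object name from un-necessary parenthesis
--     idx = next((i for i, c in enumerate(phrase) if c in '(['), len(phrase))
--     return phrase[:idx].rstrip(' ')
-- ===== Notes on version B (the rewrite author's own statement) =====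
-- stated objective: idiomatic
-- what changed: Replaces the character-by-character accumulator loop with an explicit break by locating the first bracket boundary and slicing the prefix, then right-stripping spaces.
import Mathlib
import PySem

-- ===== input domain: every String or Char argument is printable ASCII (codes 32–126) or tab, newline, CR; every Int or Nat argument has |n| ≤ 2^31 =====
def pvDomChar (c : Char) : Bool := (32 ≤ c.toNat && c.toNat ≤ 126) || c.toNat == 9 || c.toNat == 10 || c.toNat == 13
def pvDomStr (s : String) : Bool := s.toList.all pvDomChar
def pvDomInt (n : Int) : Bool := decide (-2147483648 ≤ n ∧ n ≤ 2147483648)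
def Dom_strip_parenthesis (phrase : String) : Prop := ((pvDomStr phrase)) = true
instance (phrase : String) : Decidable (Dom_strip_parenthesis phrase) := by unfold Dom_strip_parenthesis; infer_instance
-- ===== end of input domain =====

-- B replaces A's character-accumulator loop by find-first-bracket-then-slice (idiomatic; same return value).

-- hand port of str.rstrip(' '): drop trailing ' ' characters only (exact: rstrip with an
-- explicit chars argument removes exactly those trailing characters; no PySem primitive takes chars)
def pyRstripSpace (cs : List Char) : List Char :=
  (cs.reverse.dropWhile (fun c => c == ' ')).reverse

-- ===== PORT A =====
-- the for-loop with break, accumulating 'cleaned'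
def stripParenGoA (acc : List Char) : List Char → List Char
  | [] => acc
  | c :: rest => if c == '(' || c == '[' then acc else stripParenGoA (acc ++ [c]) rest

def strip_parenthesis (phrase : String) : String :=
  String.mk (pyRstripSpace (stripParenGoA [] phrase.toList))

-- ===== PORT B =====
-- idx = next((i for i,c in enumerate(phrase) if c in '(['), len(phrase)); phrase[:idx].rstrip(' ')
def strip_parenthesis_alt (phrase : String) : String :=
  let cs := phrase.toList
  let idx : Nat := cs.findIdx (fun c => c == '(' || c == '[')   -- = len cs when absent, like next(…, len(phrase))
  String.mk (pyRstripSpace (PySem.List.slice cs none (some (idx : Int))))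

-- ===== PRECONDITION & SPEC =====
def Spec_strip_parenthesis (phrase : String) (out : String) : Prop := out = strip_parenthesis_alt phrase
instance (phrase : String) (out : String) : Decidable (Spec_strip_parenthesis phrase out) := by unfold Spec_strip_parenthesis; infer_instance

-- ===== CLAIM (what is proved, stated in full; the proofs are below) =====
def Claim_equal_strip_parenthesis : Prop := ∀ (phrase : String), Dom_strip_parenthesis phrase → Spec_strip_parenthesis phrase (strip_parenthesis phrase)

-- ===== LEMMAS AND PROOFS =====

lemma stripParenGoA_eq (cs : List Char) :
    ∀ acc, stripParenGoA acc cs = acc ++ cs.takeWhile (fun c => !(c == '(' || c == '[')) := by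
  induction cs with
  | nil => intro acc; simp [stripParenGoA]
  | cons c rest ih =>
    intro acc
    by_cases h : (c == '(' || c == '[') = true
    · simp [stripParenGoA, h, List.takeWhile]
    · simp [stripParenGoA, h, List.takeWhile, ih]

lemma take_findIdx_eq_takeWhile (q : Char → Bool) (cs : List Char) :
    cs.take (cs.findIdx q) = cs.takeWhile (fun c => !q c) := by
  induction cs with
  | nil => simp
  | cons c rest ih =>
    by_cases h : q c = true
    · simp [List.findIdx_cons, List.takeWhile, h]
    · simp [List.findIdx_cons, List.takeWhile, h, ih]

-- ===== VERDICT (by name: the statement is the Claim_ definition above) =====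
theorem strip_parenthesis_spec : Claim_equal_strip_parenthesis := by
  intro phrase _
  unfold Spec_strip_parenthesis strip_parenthesis strip_parenthesis_alt
  simp only []
  rw [PySem.List.slice_to_natCast, stripParenGoA_eq, take_findIdx_eq_takeWhile]
  simp
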